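-- pv_equiv track=rewrite | github.com/mkhazaeidev/MihanBanoo | extensions/utils.py | english_week_days
-- ===== SOURCE A (Python) =====
-- def english_week_days(day):
--     week_days = {
--         '1': 'Saturday',
--         '2': 'Sunday',
--         '3': 'Monday',
--         '4': 'Tuesday',
--         '5': 'Wednesday',
--         '6': 'Thursday',
--         '7': 'Friday',
--     }
--     for en_day, fa_day in week_days.items():
--         day = day.replace(en_day, fa_day)
--     return day
-- ===== SOURCE B (Python) =====
-- def english_week_days(day):
--     names = ('Saturday', 'Sunday', 'Monday', 'Tuesday',
--              'Wednesday', 'Thursday', 'Friday')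
--     out = []
--     for c in day:
--         if '1' <= c <= '7':
--             out.append(names[ord(c) - ord('1')])
--         else:
--             out.append(c)
--     return ''.join(out)
-- ===== Notes on version B (the rewrite author's own statement) =====
-- stated objective: alternative
-- what changed: Instead of seven sequential whole-string replace passes over a dict's items, B makes one pass over the characters, expanding each weekday digit via arithmetic indexing into a weekday-name tuple and passing other characters through; correct because no weekday name contains a digit, so A's passes never interact.
import Mathlib
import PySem

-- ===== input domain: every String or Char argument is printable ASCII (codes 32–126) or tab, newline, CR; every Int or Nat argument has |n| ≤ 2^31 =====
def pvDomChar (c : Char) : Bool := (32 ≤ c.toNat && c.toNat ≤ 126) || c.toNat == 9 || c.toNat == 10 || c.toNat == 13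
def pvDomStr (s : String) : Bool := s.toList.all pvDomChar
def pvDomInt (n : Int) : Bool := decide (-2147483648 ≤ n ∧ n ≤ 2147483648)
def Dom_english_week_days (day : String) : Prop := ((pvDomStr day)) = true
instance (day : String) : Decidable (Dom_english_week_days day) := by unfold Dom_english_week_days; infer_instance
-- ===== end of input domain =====

-- B replaces A's seven sequential whole-string replace passes over a dict by one
-- accumulator loop over the characters, expanding each weekday digit by arithmetic
-- indexing into a weekday-name table; objective: alternative.

-- ===== PORT A =====
-- the week_days dict A builds
def pvWeekDays : PySem.Dict String String :=
  PySem.Dict.ofList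
    [("1", "Saturday"), ("2", "Sunday"), ("3", "Monday"), ("4", "Tuesday"),
     ("5", "Wednesday"), ("6", "Thursday"), ("7", "Friday")]

def english_week_days (day : String) : String :=
  -- for en_day, fa_day in week_days.items(): day = day.replace(en_day, fa_day)
  pvWeekDays.items.foldl (fun d p => PySem.Str.replace d p.1 p.2) day

-- ===== PORT B =====
-- names = ('Saturday', ..., 'Friday')
def pvNames : List String :=
  ["Saturday", "Sunday", "Monday", "Tuesday", "Wednesday", "Thursday", "Friday"]

-- names[ord(c) - ord('1')] if '1' <= c <= '7' else c
def pvExpand (c : Char) : String :=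
  if '1' ≤ c ∧ c ≤ '7' then pvNames.getD (c.toNat - '1'.toNat) ""
  else String.ofList [c]

def english_week_days_alt (day : String) : String :=
  -- out = []; for c in day: out.append(...); return ''.join(out)
  PySem.Str.join "" (day.toList.foldl (fun out c => out ++ [pvExpand c]) [])

-- ===== PRECONDITION & SPEC =====
def Spec_english_week_days (day : String) (out : String) : Prop := out = english_week_days_alt day
instance (day : String) (out : String) : Decidable (Spec_english_week_days day out) := by unfold Spec_english_week_days; infer_instance

-- ===== CLAIM (what is proved, stated in full; the proofs are below) =====
def Claim_equal_english_week_days : Prop := ∀ (day : String), Dom_english_week_days day → Spec_english_week_days day (english_week_days day)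

-- ===== LEMMAS AND PROOFS =====

-- single-character substitution function used to describe both sides
def pvSub (c : Char) (rep : List Char) (l : List Char) : List Char :=
  l.flatMap (fun x => if x = c then rep else [x])

-- replace with a single-character pattern is exactly pvSub
theorem pvReplaceGo_single (c : Char) (rep : List Char) :
    ∀ (fuel : Nat) (l acc : List Char), l.length ≤ fuel →
      PySem.Chars.replace.go [c] rep fuel l acc = acc.reverse ++ pvSub c rep l := by
  intro fuel
  induction fuel with
  | zero =>
      intro l acc h
      have : l = [] := List.eq_nil_of_length_eq_zero (Nat.le_zero.mp h)
      subst this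
      simp [PySem.Chars.replace.go, pvSub]
  | succ n ih =>
      intro l acc h
      cases l with
      | nil => simp [PySem.Chars.replace.go, pvSub]
      | cons x t =>
          by_cases hx : x = c
          · subst hx
            have hp : List.isPrefixOf [x] (x :: t) = true := by
              simp [List.isPrefixOf]
            rw [PySem.Chars.replace.go, if_pos hp]
            rw [show List.drop [x].length (x :: t) = t from rfl]
            simp only [List.length_cons] at h
            rw [ih t (rep.reverse ++ acc) (by omega)]
            simp [pvSub]
          · have hp : List.isPrefixOf [c] (x :: t) = false := by
              simp [List.isPrefixOf]
              exact fun hcx => absurd hcx.symm hx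
            rw [PySem.Chars.replace.go, if_neg (by simp [hp])]
            simp only [List.length_cons] at h
            rw [ih t (x :: acc) (by omega)]
            simp [pvSub, hx]

theorem pvReplace_single (c : Char) (rep l : List Char) :
    PySem.Chars.replace l [c] rep = pvSub c rep l := by
  rw [PySem.Chars.replace, if_neg (by simp)]
  simpa using pvReplaceGo_single c rep l.length l [] (le_refl _)

-- pvSub fixes a list containing no occurrence of the substituted character
theorem pvSub_fix (c : Char) (rep : List Char) (l : List Char)
    (h : ∀ x ∈ l, x ≠ c) : pvSub c rep l = l := by
  unfold pvSub
  induction l with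
  | nil => rfl
  | cons x t ih =>
      simp only [List.flatMap_cons]
      rw [if_neg (h x (List.mem_cons_self)), ih (fun y hy => h y (List.mem_cons_of_mem x hy))]
      rfl

-- pvSub distributes over flatMap
theorem pvSub_flatMap (c : Char) (rep : List Char) (l : List Char) (g : Char → List Char) :
    pvSub c rep (l.flatMap g) = l.flatMap (fun x => pvSub c rep (g x)) := by
  simp [pvSub, List.flatMap_assoc]

-- B's per-character value
def pvBchar (c : Char) : List Char := (pvExpand c).toList

-- A's per-character value: the seven substitutions applied to [c]
def pvAchar (c : Char) : List Char :=
  pvSub '7' "Friday".toList (pvSub '6' "Thursday".toList (pvSub '5' "Wednesday".toList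
    (pvSub '4' "Tuesday".toList (pvSub '3' "Monday".toList (pvSub '2' "Sunday".toList
      (pvSub '1' "Saturday".toList [c]))))))

theorem pvExpand_not_digit (c : Char)
    (h1 : c ≠ '1') (h2 : c ≠ '2') (h3 : c ≠ '3') (h4 : c ≠ '4')
    (h5 : c ≠ '5') (h6 : c ≠ '6') (h7 : c ≠ '7') :
    pvBchar c = [c] := by
  unfold pvBchar pvExpand
  rw [if_neg]
  · simp
  · rintro ⟨hl, hr⟩
    have h49 : 49 ≤ c.toNat := UInt32.le_iff_toNat_le.mp hl
    have h55 : c.toNat ≤ 55 := UInt32.le_iff_toNat_le.mp hr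
    have hv : c.toNat = 49 ∨ c.toNat = 50 ∨ c.toNat = 51 ∨ c.toNat = 52 ∨
        c.toNat = 53 ∨ c.toNat = 54 ∨ c.toNat = 55 := by omega
    rcases hv with h | h | h | h | h | h | h
    · exact h1 (by rw [← Char.ofNat_toNat c, h])
    · exact h2 (by rw [← Char.ofNat_toNat c, h])
    · exact h3 (by rw [← Char.ofNat_toNat c, h])
    · exact h4 (by rw [← Char.ofNat_toNat c, h])
    · exact h5 (by rw [← Char.ofNat_toNat c, h])
    · exact h6 (by rw [← Char.ofNat_toNat c, h])
    · exact h7 (by rw [← Char.ofNat_toNat c, h])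

theorem pvChar_eq (c : Char) : pvAchar c = pvBchar c := by
  by_cases h1 : c = '1'
  · subst h1; decide
  by_cases h2 : c = '2'
  · subst h2; decide
  by_cases h3 : c = '3'
  · subst h3; decide
  by_cases h4 : c = '4'
  · subst h4; decide
  by_cases h5 : c = '5'
  · subst h5; decide
  by_cases h6 : c = '6'
  · subst h6; decide
  by_cases h7 : c = '7'
  · subst h7; decide
  rw [pvExpand_not_digit c h1 h2 h3 h4 h5 h6 h7]
  unfold pvAchar
  rw [pvSub_fix '1' _ [c] (by simpa using h1),
      pvSub_fix '2' _ [c] (by simpa using h2),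
      pvSub_fix '3' _ [c] (by simpa using h3),
      pvSub_fix '4' _ [c] (by simpa using h4),
      pvSub_fix '5' _ [c] (by simpa using h5),
      pvSub_fix '6' _ [c] (by simpa using h6),
      pvSub_fix '7' _ [c] (by simpa using h7)]

-- A's character list is the per-character substitution applied pointwise
theorem pvA_chars (l : List Char) :
    pvSub '7' "Friday".toList (pvSub '6' "Thursday".toList (pvSub '5' "Wednesday".toList
      (pvSub '4' "Tuesday".toList (pvSub '3' "Monday".toList (pvSub '2' "Sunday".toList
        (pvSub '1' "Saturday".toList l)))))) = l.flatMap pvAchar := by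
  have base : pvSub '1' "Saturday".toList l = l.flatMap (fun c => pvSub '1' "Saturday".toList [c]) := by
    simp [pvSub]
  rw [base, pvSub_flatMap, pvSub_flatMap, pvSub_flatMap, pvSub_flatMap, pvSub_flatMap,
      pvSub_flatMap]
  rfl

-- B's accumulator loop collects the per-character expansions in order
theorem pvB_fold (l : List Char) (acc : List String) :
    l.foldl (fun out c => out ++ [pvExpand c]) acc = acc ++ l.map pvExpand := by
  induction l generalizing acc with
  | nil => simp
  | cons x t ih => simp [ih]

-- ''.join with empty separator is concatenation
theorem pvJoin_nil (parts : List (List Char)) :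
    PySem.Chars.join [] parts = parts.flatten := by
  unfold PySem.Chars.join
  induction parts with
  | nil => rfl
  | cons x xs ih =>
      cases xs with
      | nil => simp [List.intercalate]
      | cons y t =>
          simp only [List.intercalate, List.intersperse] at ih ⊢
          simp [ih]

-- ===== VERDICT (by name: the statement is the Claim_ definition above) =====
theorem english_week_days_spec : Claim_equal_english_week_days := by
  intro day _
  unfold Spec_english_week_days english_week_days english_week_days_alt
  apply String.toList_inj.mp
  rw [show pvWeekDays.items =
      [("1", "Saturday"), ("2", "Sunday"), ("3", "Monday"), ("4", "Tuesday"),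
       ("5", "Wednesday"), ("6", "Thursday"), ("7", "Friday")] from rfl]
  simp only [List.foldl_cons, List.foldl_nil, PySem.Str.toList_replace, PySem.Str.toList_join]
  rw [show ("1" : String).toList = ['1'] from rfl, pvReplace_single]
  rw [show ("2" : String).toList = ['2'] from rfl, pvReplace_single]
  rw [show ("3" : String).toList = ['3'] from rfl, pvReplace_single]
  rw [show ("4" : String).toList = ['4'] from rfl, pvReplace_single]
  rw [show ("5" : String).toList = ['5'] from rfl, pvReplace_single]
  rw [show ("6" : String).toList = ['6'] from rfl, pvReplace_single]
  rw [show ("7" : String).toList = ['7'] from rfl, pvReplace_single]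
  rw [pvA_chars, pvB_fold]
  rw [show ("" : String).toList = ([] : List Char) from rfl, pvJoin_nil]
  simp only [List.nil_append, List.map_map]
  rw [show (String.toList ∘ pvExpand) = pvBchar from rfl]
  rw [show (day.toList.map pvBchar).flatten = day.toList.flatMap pvBchar from
      List.flatMap_def.symm]
  exact List.flatMap_congr (fun c _ => pvChar_eq c)
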